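-- pv_equiv track=rewrite | github.com/LFDECO/Leetcode-solutions | 3839-number-of-prefix-connected-groups/3839-number-of-prefix-connected-groups.py | prefixConnected
-- ===== SOURCE A (Python) =====
-- from typing import List
--
-- def prefixConnected(words: List[str], k: int) -> int:
--     dicto={}
--     count=0
--     for i in words:
--         if len(i)<k:
--             continue
--         else:
--             prefix=i[0:k]
--             if prefix in dicto:
--                 dicto[prefix]+=1
--             else:
--                 dicto[prefix]=1
--     for i in dicto:
--         if dicto[i]>=2:
--             count+=1
--     return count
-- ===== SOURCE B (Python) =====
-- def prefixConnected(words, k):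
--     prefixes = sorted(w[:k] for w in words if len(w) >= k)
--     count = 0
--     i = 0
--     n = len(prefixes)
--     while i < n:
--         j = i + 1
--         while j < n and prefixes[j] == prefixes[i]:
--             j += 1
--         if j - i >= 2:
--             count += 1
--         i = j
--     return count
-- ===== Notes on version B (the rewrite author's own statement) =====
-- stated objective: alternative
-- what changed: Replaces A's hash-map counting (build a dict of prefix counts, then a second pass over the keys counting those with count >= 2) by sort-then-scan: collect the valid k-prefixes, sort them, and walk the sorted list once counting maximal runs of equal adjacent prefixes of length >= 2.
import Mathlib
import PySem

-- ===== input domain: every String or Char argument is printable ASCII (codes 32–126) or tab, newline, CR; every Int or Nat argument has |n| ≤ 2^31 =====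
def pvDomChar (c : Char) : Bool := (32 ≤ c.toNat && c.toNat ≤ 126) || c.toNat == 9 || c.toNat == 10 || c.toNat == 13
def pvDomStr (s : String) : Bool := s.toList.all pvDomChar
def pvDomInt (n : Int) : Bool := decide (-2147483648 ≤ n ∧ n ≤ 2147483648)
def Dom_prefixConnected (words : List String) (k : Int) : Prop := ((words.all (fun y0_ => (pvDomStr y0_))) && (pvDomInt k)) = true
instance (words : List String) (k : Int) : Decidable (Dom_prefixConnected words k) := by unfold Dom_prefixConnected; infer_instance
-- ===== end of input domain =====

-- B replaces A's dict-of-counts (build counter, then a second pass counting keys with count ≥ 2)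
-- by sort-then-scan: sort the valid prefixes and count maximal runs of equal adjacent prefixes of length ≥ 2.
-- Alternative algorithm, not claimed faster.

-- ===== PORT A =====
def prefixConnected (words : List String) (k : Int) : Int :=
  let dicto : PySem.Dict String Int := words.foldl (fun d i =>
      if PySem.Str.len i < k then d
      else
        let pfx := PySem.Str.slice i (some 0) (some k)
        if d.contains pfx then d.insert pfx (d.getD pfx 0 + 1)   -- dicto[prefix] += 1 (key present)
        else d.insert pfx 1)
    PySem.Dict.empty
  dicto.keys.foldl (fun count i => if dicto.getD i 0 ≥ 2 then count + 1 else count) 0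

-- ===== PORT B =====
-- port of Source B's outer while loop over run starts: the inner `while j < n and prefixes[j] == prefixes[i]`
-- advance is exactly takeWhile/dropWhile of the remaining list, `j - i` is the run length.
def prefixRuns (prefixes : List String) : Int :=
  match prefixes with
  | [] => 0
  | a :: t =>
      (if ((t.takeWhile (fun x => x == a)).length : Int) + 1 ≥ 2 then 1 else 0)
      + prefixRuns (t.dropWhile (fun x => x == a))
termination_by prefixes.length
decreasing_by
  simp only [List.length_cons]
  exact Nat.lt_succ_of_le (List.length_dropWhile_le _ _)

def prefixConnected_alt (words : List String) (k : Int) : Int :=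
  let prefixes := PySem.List.sorted
    ((words.filter (fun w => decide (PySem.Str.len w ≥ k))).map
      (fun w => PySem.Str.slice w none (some k)))
    (fun x => x) false
  prefixRuns prefixes

-- ===== PRECONDITION & SPEC =====
def Spec_prefixConnected (words : List String) (k : Int) (out : Int) : Prop := out = prefixConnected_alt words k
instance (words : List String) (k : Int) (out : Int) : Decidable (Spec_prefixConnected words k out) := by unfold Spec_prefixConnected; infer_instance

-- ===== CLAIM (what is proved, stated in full; the proofs are below) =====
def Claim_equal_prefixConnected : Prop := ∀ (words : List String) (k : Int), Dom_prefixConnected words k → Spec_prefixConnected words k (prefixConnected words k)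

-- ===== LEMMAS AND PROOFS =====

-- the list of valid k-prefixes, exactly as Source B builds it
def prefList (words : List String) (k : Int) : List String :=
  (words.filter (fun w => decide (PySem.Str.len w ≥ k))).map
    (fun w => PySem.Str.slice w none (some k))

lemma slice_zero_eq (i : String) (k : Int) :
    PySem.Str.slice i (some 0) (some k) = PySem.Str.slice i none (some k) := by
  simp [PySem.Str.slice]

-- A's dict-building loop is the plain counter loop over the prefix list
lemma foldA_eq (words : List String) (k : Int) (d : PySem.Dict String Int) :
    words.foldl (fun d i =>
      if PySem.Str.len i < k then d
      else
        let pfx := PySem.Str.slice i (some 0) (some k)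
        if d.contains pfx then d.insert pfx (d.getD pfx 0 + 1)
        else d.insert pfx 1) d
    = (prefList words k).foldl (fun d x => d.insert x (d.getD x 0 + 1)) d := by
  induction words generalizing d with
  | nil => simp [prefList]
  | cons w ws ih =>
    have hlen := PySem.Str.len_eq w
    by_cases h : PySem.Str.len w < k
    · have hd : (decide (PySem.Str.len w ≥ k)) = false := by
        simp only [ge_iff_le, decide_eq_false_iff_not]; omega
      simp only [List.foldl_cons, if_pos h, prefList, List.filter_cons, hd, Bool.false_eq_true, if_false]
      exact ih d
    · have hd : (decide (PySem.Str.len w ≥ k)) = true := by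
        simp only [ge_iff_le, decide_eq_true_eq]; omega
      simp only [List.foldl_cons, if_neg h, prefList, List.filter_cons, hd, if_true,
        List.map_cons, List.foldl_cons]
      rw [ih]
      rw [slice_zero_eq]
      congr 1
      by_cases hc : d.contains (PySem.Str.slice w none (some k))
      · simp only [hc, if_true]
      · simp only [Bool.not_eq_true] at hc
        simp only [hc, Bool.false_eq_true, if_false,
          PySem.Dict.getD_of_not_contains d 0 hc, zero_add]

-- A computes: number of distinct prefixes occurring at least twice
lemma countP_ofList_card (l : List String) :
    ((PySem.Set.ofList l).countP (fun x => decide (2 ≤ l.count x)))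
      = (l.toFinset.filter (fun x => 2 ≤ l.count x)).card := by
  rw [List.countP_eq_length_filter,
    ← List.toFinset_card_of_nodup ((PySem.Set.nodup_ofList l).filter _)]
  congr 1
  rw [List.toFinset_filter]
  apply Finset.ext
  intro x
  simp [PySem.Set.mem_ofList]

lemma A_eq (words : List String) (k : Int) :
    prefixConnected words k
      = (((prefList words k).toFinset.filter
            (fun x => 2 ≤ (prefList words k).count x)).card : Int) := by
  unfold prefixConnected
  simp only [foldA_eq]
  rw [PySem.Dict.keys_foldl_insert]
  rw [PySem.List.foldl_ite_add_one]
  have hkeys : PySem.Set.update (PySem.Dict.empty (κ := String) (ν := Int)).keys (prefList words k)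
      = PySem.Set.ofList (prefList words k) := by
    rw [PySem.Dict.keys_empty, PySem.Set.ofList_eq_foldl]; rfl
  rw [hkeys, zero_add, ← countP_ofList_card]
  congr 1
  apply List.countP_congr
  intro x _
  rw [PySem.Dict.getD_foldl_insert_add_one, PySem.Dict.getD_empty, zero_add]
  simp only [ge_iff_le, decide_eq_true_eq]
  exact_mod_cast Iff.rfl

-- the run scan on a ≤-sorted list counts the distinct elements of count ≥ 2
lemma runs_eq_aux : ∀ (n : Nat) (s : List String), s.length ≤ n → s.Pairwise (· ≤ ·) →
    prefixRuns s = ((s.toFinset.filter (fun x => 2 ≤ s.count x)).card : Int) := by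
  intro n
  induction n with
  | zero =>
    intro s hs _
    have : s = [] := List.length_eq_zero_iff.mp (Nat.le_zero.mp hs)
    subst this
    simp [prefixRuns]
  | succ n ih =>
    intro s hs hp
    match s with
    | [] => simp [prefixRuns]
    | a :: t =>
      have hat : ∀ x ∈ t, a ≤ x := (List.pairwise_cons.mp hp).1
      have hpt : t.Pairwise (· ≤ ·) := (List.pairwise_cons.mp hp).2
      have hsplit : t.takeWhile (fun x => x == a) ++ t.dropWhile (fun x => x == a) = t :=
        List.takeWhile_append_dropWhile
      have hruna : ∀ x ∈ t.takeWhile (fun x => x == a), x = a := by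
        intro x hx
        have hb : ((fun x => x == a) x) = true := List.mem_takeWhile_imp (p := fun x => x == a) hx
        simpa using hb
      have hprest : (t.dropWhile (fun x => x == a)).Pairwise (· ≤ ·) :=
        hpt.sublist (List.dropWhile_sublist _)
      have hrest : ∀ x ∈ t.dropWhile (fun x => x == a), ¬ x = a := by
        rcases hrc : t.dropWhile (fun x => x == a) with _ | ⟨b, r⟩
        · intro x hx; simp at hx
        · have hb : ¬ b = a := by
            have hh := List.head?_dropWhile_not (fun x => x == a) t
            rw [hrc] at hh
            simpa using hh
          have hbt : b ∈ t := (List.dropWhile_sublist _).mem (by rw [hrc]; simp)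
          have hab : a < b := lt_of_le_of_ne (hat b hbt) (Ne.symm hb)
          have hbr : ∀ x ∈ r, b ≤ x := by
            have := hprest
            rw [hrc] at this
            exact (List.pairwise_cons.mp this).1
          intro x hx
          rcases List.mem_cons.mp hx with rfl | hxr
          · exact hb
          · exact (lt_of_lt_of_le hab (hbr x hxr)).ne'
      have h3 : ∀ x, List.count x t
          = List.count x (t.takeWhile (fun y => y == a)) + List.count x (t.dropWhile (fun y => y == a)) := by
        intro x
        conv_lhs => rw [← hsplit]
        rw [List.count_append]
      have hca : List.count a (a :: t) = (t.takeWhile (fun x => x == a)).length + 1 := by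
        have h1 : List.count a (t.takeWhile (fun x => x == a))
            = (t.takeWhile (fun x => x == a)).length :=
          List.count_eq_length.mpr (fun b hb => (hruna b hb).symm)
        have h2 : List.count a (t.dropWhile (fun x => x == a)) = 0 :=
          List.count_eq_zero.mpr (fun hmem => hrest a hmem rfl)
        have h4 := h3 a
        rw [List.count_cons_self]
        omega
      have hcx : ∀ x, x ≠ a → List.count x (a :: t) = List.count x (t.dropWhile (fun y => y == a)) := by
        intro x hxa
        have h1 : List.count x (t.takeWhile (fun y => y == a)) = 0 :=
          List.count_eq_zero.mpr (fun hmem => hxa (hruna x hmem))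
        have h4 := h3 x
        rw [List.count_cons_of_ne (Ne.symm hxa)]
        omega
      have hmem : ∀ x : String, x ∈ t ↔
          x ∈ t.takeWhile (fun y => y == a) ∨ x ∈ t.dropWhile (fun y => y == a) := by
        intro x
        conv_lhs => rw [← hsplit]
        exact List.mem_append
      have hfin : (a :: t).toFinset = insert a (t.dropWhile (fun x => x == a)).toFinset := by
        apply Finset.ext
        intro x
        simp only [List.toFinset_cons, Finset.mem_insert, List.mem_toFinset, hmem x]
        constructor
        · rintro (rfl | hx | hx)
          · exact Or.inl rfl
          · exact Or.inl (hruna x hx)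
          · exact Or.inr hx
        · rintro (rfl | hx)
          · exact Or.inl rfl
          · exact Or.inr (Or.inr hx)
      have hfilter : (t.dropWhile (fun x => x == a)).toFinset.filter
            (fun x => 2 ≤ (a :: t).count x)
          = (t.dropWhile (fun x => x == a)).toFinset.filter
            (fun x => 2 ≤ (t.dropWhile (fun x => x == a)).count x) := by
        apply Finset.filter_congr
        intro x hx
        rw [hcx x (fun hxa => hrest x (List.mem_toFinset.mp hx) hxa)]
      have hrl : (t.dropWhile (fun x => x == a)).length ≤ n := by
        have h1 := List.length_dropWhile_le (fun x => x == a) t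
        have h2 : t.length + 1 ≤ n + 1 := by simpa using hs
        omega
      have hihr := ih (t.dropWhile (fun x => x == a)) hrl hprest
      rw [prefixRuns, hihr, hfin, Finset.filter_insert, hfilter]
      have hnotmem : a ∉ (t.dropWhile (fun x => x == a)).toFinset.filter
          (fun x => 2 ≤ (t.dropWhile (fun x => x == a)).count x) := by
        intro hmem
        exact hrest a (List.mem_toFinset.mp (Finset.mem_of_mem_filter a hmem)) rfl
      by_cases hcond : 2 ≤ (a :: t).count a
      · have hif : ((((t.takeWhile (fun x => x == a)).length : Int) + 1) ≥ 2) := by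
          rw [hca] at hcond; omega
        rw [if_pos hcond, if_pos hif, Finset.card_insert_of_notMem hnotmem]
        push_cast
        ring
      · have hif : ¬ ((((t.takeWhile (fun x => x == a)).length : Int) + 1) ≥ 2) := by
          rw [hca] at hcond; omega
        rw [if_neg hcond, if_neg hif]
        simp

lemma B_eq (words : List String) (k : Int) :
    prefixConnected_alt words k
      = (((prefList words k).toFinset.filter
            (fun x => 2 ≤ (prefList words k).count x)).card : Int) := by
  unfold prefixConnected_alt
  have hperm : (PySem.List.sorted (prefList words k) (fun x => x) false).Perm (prefList words k) :=
    PySem.List.sorted_perm _ _ _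
  have hpair : (PySem.List.sorted (prefList words k) (fun x => x) false).Pairwise (· ≤ ·) :=
    PySem.List.sorted_pairwise (prefList words k) (fun x => x)
  rw [show ((words.filter (fun w => decide (PySem.Str.len w ≥ k))).map
      (fun w => PySem.Str.slice w none (some k))) = prefList words k from rfl]
  rw [runs_eq_aux (PySem.List.sorted (prefList words k) (fun x => x) false).length _ le_rfl hpair]
  rw [List.toFinset_eq_of_perm _ _ hperm]
  congr 2
  apply Finset.filter_congr
  intro x _
  rw [hperm.count_eq x]

-- ===== VERDICT (by name: the statement is the Claim_ definition above) =====
theorem prefixConnected_spec : Claim_equal_prefixConnected := by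
  intro words k _
  unfold Spec_prefixConnected
  rw [A_eq, B_eq]
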